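-- pv_equiv track=rewrite | github.com/deniskirbaba/python-learning | yandex-algorithm-training/1/hw_1/C.py | get_code_number
-- ===== SOURCE A (Python) =====
-- def get_code_number(s: str) -> tuple[str, str]:
--     code, number = '', ''
--     for i in reversed(s):
--         if i not in '+-()':
--             if len(number) < 7:
--                 number += i
--             elif len(code) < 3:
--                 code += i
--     number = number[::-1]
--     if not code:
--         code = '495'
--     else:
--         code = code[::-1]
--     return code, number
-- ===== SOURCE B (Python) =====
-- def get_code_number(s: str) -> tuple[str, str]:
--     clean = [c for c in s if c not in '+-()']
--     number = ''.join(clean[-7:])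
--     code_chars = clean[:-7][-3:]
--     code = ''.join(code_chars) if code_chars else '495'
--     return code, number
-- ===== Notes on version B (the rewrite author's own statement) =====
-- stated objective: simpler
-- what changed: Replaces the reverse iteration with in-loop length counters and two string reversals by one forward filter plus two slices: number = last 7 kept chars, code = the 3 before them (or '495' if none).
import Mathlib
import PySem

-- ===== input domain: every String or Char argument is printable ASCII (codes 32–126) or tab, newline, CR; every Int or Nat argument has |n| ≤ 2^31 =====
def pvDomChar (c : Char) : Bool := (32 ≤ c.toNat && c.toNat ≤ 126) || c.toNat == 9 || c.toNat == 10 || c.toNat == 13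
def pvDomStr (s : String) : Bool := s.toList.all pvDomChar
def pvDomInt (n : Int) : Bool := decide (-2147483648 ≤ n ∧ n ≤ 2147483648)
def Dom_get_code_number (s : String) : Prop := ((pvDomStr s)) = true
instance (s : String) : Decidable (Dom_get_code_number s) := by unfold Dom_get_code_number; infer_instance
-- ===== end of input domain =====

-- B replaces A's reverse iteration with length counters and double reversal by a forward filter plus slicing (objective: simpler).


-- ===== PORT A =====
-- A's loop body: skip '+-()', fill number up to 7 chars, then code up to 3.
def pvLoopA (st : List Char × List Char) (c : Char) : List Char × List Char :=
  if c ∈ ['+', '-', '(', ')'] then st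
  else if st.2.length < 7 then (st.1, st.2 ++ [c])
  else if st.1.length < 3 then (st.1 ++ [c], st.2)
  else st

def get_code_number (s : String) : String × String :=
  let st := s.toList.reverse.foldl pvLoopA ([], [])
  let number := st.2.reverse
  let code := if st.1 = [] then "495" else String.ofList st.1.reverse
  (code, String.ofList number)

-- ===== PORT B =====
def get_code_number_alt (s : String) : String × String :=
  let clean := s.toList.filter (fun c => decide (c ∉ ['+', '-', '(', ')']))
  let number := String.ofList (PySem.List.slice clean (some (-7)) none)
  let codeChars := PySem.List.slice (PySem.List.slice clean none (some (-7))) (some (-3)) none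
  let code := if codeChars.isEmpty then "495" else String.ofList codeChars
  (code, number)

-- ===== PRECONDITION & SPEC =====
def Spec_get_code_number (s : String) (out : String × String) : Prop := out = get_code_number_alt s
instance (s : String) (out : String × String) : Decidable (Spec_get_code_number s out) := by unfold Spec_get_code_number; infer_instance

-- ===== CLAIM (what is proved, stated in full; the proofs are below) =====
def Claim_equal_get_code_number : Prop := ∀ (s : String), Dom_get_code_number s → Spec_get_code_number s (get_code_number s)

-- ===== LEMMAS AND PROOFS =====
-- Invariant of A's loop: from any state, the filtered input tops up number to 7 chars, then code to 3.
theorem pvLoopA_inv (l : List Char) (code number : List Char) :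
    l.foldl pvLoopA (code, number) =
      (code ++ (((l.filter (fun c => decide (c ∉ ['+', '-', '(', ')']))).drop (7 - number.length)).take (3 - code.length)),
       number ++ (l.filter (fun c => decide (c ∉ ['+', '-', '(', ')']))).take (7 - number.length)) := by
  induction l generalizing code number with
  | nil => simp
  | cons c l ih =>
    by_cases hc : c ∈ ['+', '-', '(', ')']
    · have hpc : (fun c => decide (c ∉ (['+', '-', '(', ')'] : List Char))) c = false := by
        simp [hc]
      simp only [List.foldl_cons, List.filter_cons, hpc, Bool.false_eq_true, if_false]
      have hskip : pvLoopA (code, number) c = (code, number) := by simp [pvLoopA, hc]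
      rw [hskip, ih]
    · have hpc : (fun c => decide (c ∉ (['+', '-', '(', ')'] : List Char))) c = true := by
        simp [hc]
      simp only [List.foldl_cons, List.filter_cons, hpc, if_true]
      by_cases hn : number.length < 7
      · have hstep : pvLoopA (code, number) c = (code, number ++ [c]) := by
          simp [pvLoopA, hc, hn]
        rw [hstep, ih]
        have h7 : 7 - number.length = (7 - (number ++ [c]).length) + 1 := by
          simp [List.length_append]; omega
        rw [h7, List.drop_succ_cons, List.take_succ_cons, List.append_assoc]
        simp
      · by_cases hk : code.length < 3
        · have hstep : pvLoopA (code, number) c = (code ++ [c], number) := by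
            simp [pvLoopA, hc, hn, hk]
          rw [hstep, ih]
          have h7 : 7 - number.length = 0 := by omega
          have h7' : 7 - (number ++ [c]).length = 0 := by
            simp [List.length_append]; omega
          have h3 : 3 - code.length = (3 - (code ++ [c]).length) + 1 := by
            simp [List.length_append]; omega
          simp [h7, h3, List.append_assoc]
        · have hstep : pvLoopA (code, number) c = (code, number) := by
            simp [pvLoopA, hc, hn, hk]
          rw [hstep, ih]
          have h7 : 7 - number.length = 0 := by omega
          have h3 : 3 - code.length = 0 := by omega
          simp [h7, h3]

theorem get_code_number_spec : Claim_equal_get_code_number := by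
  intro s _
  unfold Spec_get_code_number
  simp only [get_code_number, get_code_number_alt]
  rw [pvLoopA_inv, List.filter_reverse]
  simp only [List.length_nil, Nat.sub_zero, List.nil_append]
  generalize (List.filter (fun c => decide (c ∉ (['+', '-', '(', ')'] : List Char))) s.toList) = cl
  have hnum : (cl.reverse.take 7).reverse = PySem.List.slice cl (some (-7)) none := by
    rw [PySem.List.slice_from_neg_ofNat cl 7 (by omega), List.take_reverse, List.reverse_reverse]
  have hcode : ((cl.reverse.drop 7).take 3).reverse =
      PySem.List.slice (PySem.List.slice cl none (some (-7))) (some (-3)) none := by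
    rw [PySem.List.slice_to_neg_ofNat cl 7 (by omega),
      PySem.List.slice_from_neg_ofNat _ 3 (by omega), List.drop_reverse, List.take_reverse,
      List.reverse_reverse, List.length_take]
  by_cases h : (cl.reverse.drop 7).take 3 = []
  · have h2 : (PySem.List.slice (PySem.List.slice cl none (some (-7))) (some (-3)) none).isEmpty = true := by
      rw [← hcode, h]
      rfl
    rw [if_pos h, if_pos h2, hnum]
  · have h2 : ¬ (PySem.List.slice (PySem.List.slice cl none (some (-7))) (some (-3)) none).isEmpty = true := by
      rw [← hcode]
      simp [List.isEmpty_iff, h]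
    rw [if_neg h, if_neg h2, hnum, hcode]
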